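-- pv_equiv track=rewrite | github.com/dynamics-research-group/agnetwork | main_MCS_cclique.py | check_adjacency
-- ===== SOURCE A (Python) =====
-- def check_adjacency(cliques, E1, E2):
--     """Check that all are adjacent in the graphs"""
--     c_cliques = []
--     for clique in cliques:
--         vi = list(clique)[0]
--         v_seen = set()
--         connected = is_connected(clique, v_seen, vi, E1, E2)
--         if connected == True:
--             c_cliques.append(clique)
--     return c_cliques
--
-- def is_connected(clique, v_seen, vi, E1, E2):
--     v_seen.add(vi)
--     if len(v_seen) == len(clique): return True
--     for v2 in clique:
--         for vi in v_seen:
--             if v2 not in v_seen: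
--                 if ({vi[0], v2[0]} in E1) or ({v2[0], vi[0]} in E1):
--                     if ({vi[1], v2[1]} in E2) or ({v2[1], vi[1]} in E2):
--                         return is_connected(clique, v_seen, v2, E1, E2)
--     return False
-- ===== SOURCE B (Python) =====
-- def check_adjacency(cliques, E1, E2):
--     """Check that all are adjacent in the graphs (iterative fixpoint component growth)"""
--     c_cliques = []
--     for clique in cliques:
--         vi = list(clique)[0]
--         seen = {vi}
--         changed = True
--         while changed:
--             changed = False
--             for v in clique:
--                 if v not in seen and any(({u[0], v[0]} in E1) and ({u[1], v[1]} in E2) for u in seen):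
--                     seen.add(v)
--                     changed = True
--         if len(seen) == len(clique):
--             c_cliques.append(clique)
--     return c_cliques
-- ===== Notes on version B (the rewrite author's own statement) =====
-- stated objective: alternative
-- what changed: The recursive is_connected (which re-enters itself after adding one adjacent vertex found by a nested scan) is replaced by an iterative fixpoint component growth: a seen set seeded with the first vertex grows in while-changed sweeps over the clique, and the clique is kept iff the grown component covers it; the {a,b}-in-E1/E2 membership tests are unchanged.
import Mathlib
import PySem

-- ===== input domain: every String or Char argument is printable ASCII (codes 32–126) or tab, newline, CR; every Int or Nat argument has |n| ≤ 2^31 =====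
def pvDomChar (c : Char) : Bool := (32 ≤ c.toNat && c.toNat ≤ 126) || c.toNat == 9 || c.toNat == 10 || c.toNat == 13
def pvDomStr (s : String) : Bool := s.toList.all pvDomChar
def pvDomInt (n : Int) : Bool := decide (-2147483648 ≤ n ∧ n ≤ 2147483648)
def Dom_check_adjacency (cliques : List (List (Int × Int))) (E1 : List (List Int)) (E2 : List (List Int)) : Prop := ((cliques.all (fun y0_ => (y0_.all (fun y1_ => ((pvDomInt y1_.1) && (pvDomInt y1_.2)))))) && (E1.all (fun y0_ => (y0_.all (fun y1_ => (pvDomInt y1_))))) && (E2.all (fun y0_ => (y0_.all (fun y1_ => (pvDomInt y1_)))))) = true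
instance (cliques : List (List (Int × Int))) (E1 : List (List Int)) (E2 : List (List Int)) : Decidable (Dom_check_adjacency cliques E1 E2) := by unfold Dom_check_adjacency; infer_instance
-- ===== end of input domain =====

-- B replaces the recursive is_connected with an iterative while-changed fixpoint component
-- growth (same membership tests, same results): a different decomposition, not a speed claim.


-- ===== PORT A =====
-- `{x, y} in E` where E holds SETS of ints: membership compares the two-element set with
-- each member set by set equality (order-insensitive) — PySem.Set.equal is exact for that.
def pySetInEdges (s : PySem.Set Int) (E : List (List Int)) : Bool :=
  E.any (fun e => PySem.Set.equal s e)

-- `({vi[0], v2[0]} in E1 or {v2[0], vi[0]} in E1) and ({vi[1], v2[1]} in E2 or ...)`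
def aEdgeTest (vi v2 : Int × Int) (E1 E2 : List (List Int)) : Bool :=
  (pySetInEdges (PySem.Set.ofList [vi.1, v2.1]) E1 ||
   pySetInEdges (PySem.Set.ofList [v2.1, vi.1]) E1) &&
  (pySetInEdges (PySem.Set.ofList [vi.2, v2.2]) E2 ||
   pySetInEdges (PySem.Set.ofList [v2.2, vi.2]) E2)

-- is_connected(clique, v_seen, vi, E1, E2). The double for-loop returns at the FIRST
-- v2 ∈ clique with v2 ∉ v_seen and some vi' ∈ v_seen passing both edge tests (an `any`
-- over the set v_seen: the result does not depend on the set's iteration order).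
-- Each recursive call adds one unseen vertex, so depth ≤ len(clique)+1: fuel bounds it.
def is_connected (fuel : Nat) (clique : List (Int × Int)) (v_seen : PySem.Set (Int × Int))
    (vi : Int × Int) (E1 E2 : List (List Int)) : Bool :=
  match fuel with
  | 0 => false  -- unreachable with fuel = len(clique)+1 (proved in the lemmas below)
  | fuel + 1 =>
    let v_seen := v_seen.add vi
    if PySem.Set.len v_seen = clique.length then true
    else
      match clique.find? (fun v2 => !(v_seen.contains v2) &&
          v_seen.any (fun vi' => aEdgeTest vi' v2 E1 E2)) with
      | some v2 => is_connected fuel clique v_seen v2 E1 E2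
      | none => false

def check_adjacency (cliques : List (List (Int × Int))) (E1 : List (List Int)) (E2 : List (List Int)) : List (List (Int × Int)) :=
  cliques.foldl (fun c_cliques clique =>
    match PySem.List.pyGet? clique 0 with
    | none => c_cliques  -- Python: IndexError (empty clique); excluded by Pre_
    | some vi =>
      let connected := is_connected (clique.length + 1) clique PySem.Set.empty vi E1 E2
      if connected then c_cliques ++ [clique] else c_cliques) []

-- ===== PORT B =====
-- `{u[0], v[0]} in E1 and {u[1], v[1]} in E2` — Source B's adjacency test
def caEdgeOK (u v : Int × Int) (E1 E2 : List (List Int)) : Bool :=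
  pySetInEdges (PySem.Set.ofList [u.1, v.1]) E1 &&
  pySetInEdges (PySem.Set.ofList [u.2, v.2]) E2

-- one `for v in clique:` body of Source B's sweep; the state is (seen, changed)
def caStep (E1 E2 : List (List Int)) (st : PySem.Set (Int × Int) × Bool)
    (v : Int × Int) : PySem.Set (Int × Int) × Bool :=
  if !(st.1.contains v) && st.1.any (fun u => caEdgeOK u v E1 E2)
  then (st.1.add v, true) else st

-- the `while changed:` loop; every changed sweep grows seen, so fuel len(clique)+1
-- always reaches the unchanged sweep (proved in the lemmas below)
def caLoop (fuel : Nat) (clique : List (Int × Int)) (seen : PySem.Set (Int × Int))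
    (E1 E2 : List (List Int)) : PySem.Set (Int × Int) :=
  match fuel with
  | 0 => seen
  | fuel + 1 =>
    let st := clique.foldl (caStep E1 E2) (seen, false)
    if st.2 then caLoop fuel clique st.1 E1 E2 else st.1

def check_adjacency_alt (cliques : List (List (Int × Int))) (E1 : List (List Int)) (E2 : List (List Int)) : List (List (Int × Int)) :=
  cliques.foldl (fun c_cliques clique =>
    match PySem.List.pyGet? clique 0 with
    | none => c_cliques  -- Python: IndexError (empty clique); excluded by Pre_
    | some vi =>
      let seen := caLoop (clique.length + 1) clique (PySem.Set.ofList [vi]) E1 E2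
      if PySem.Set.len seen = clique.length then c_cliques ++ [clique] else c_cliques) []

-- ===== PRECONDITION & SPEC =====
-- Pre_ excludes exactly the inputs on which A raises: a clique list containing an
-- empty clique (list(clique)[0] → IndexError; B raises there too).
def Pre_check_adjacency (cliques : List (List (Int × Int))) (E1 : List (List Int)) (E2 : List (List Int)) : Prop :=
  ∀ c ∈ cliques, c ≠ []
instance (cliques : List (List (Int × Int))) (E1 : List (List Int)) (E2 : List (List Int)) : Decidable (Pre_check_adjacency cliques E1 E2) := by unfold Pre_check_adjacency; infer_instance

def pvWitness_check_adjacency : (List (List (Int × Int))) × List (List Int) × List (List Int) :=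
  ([[(1, 2)], [(1, 2), (3, 4)]], [[1, 3]], [[2, 4]])

def Spec_check_adjacency (cliques : List (List (Int × Int))) (E1 : List (List Int)) (E2 : List (List Int)) (out : List (List (Int × Int))) : Prop := out = check_adjacency_alt cliques E1 E2
instance (cliques : List (List (Int × Int))) (E1 : List (List Int)) (E2 : List (List Int)) (out : List (List (Int × Int))) : Decidable (Spec_check_adjacency cliques E1 E2 out) := by unfold Spec_check_adjacency; infer_instance

-- ===== CLAIM (what is proved, stated in full; the proofs are below) =====
def Claim_equal_check_adjacency : Prop := ∀ (cliques : List (List (Int × Int))) (E1 : List (List Int)) (E2 : List (List Int)), Dom_check_adjacency cliques E1 E2 → Pre_check_adjacency cliques E1 E2 → Spec_check_adjacency cliques E1 E2 (check_adjacency cliques E1 E2)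

-- ===== LEMMAS AND PROOFS =====

-- reachability inside the clique along edges present in both graphs (B's adjacency test)
abbrev Reach (clique : List (Int × Int)) (E1 E2 : List (List Int)) (s v : Int × Int) : Prop :=
  Relation.ReflTransGen (fun x y => y ∈ clique ∧ caEdgeOK x y E1 E2 = true) s v

-- the common characterisation: the clique is kept iff it has no duplicates and every
-- vertex is reachable from the start vertex
def Qprop (clique : List (Int × Int)) (E1 E2 : List (List Int)) (start : Int × Int) : Prop :=
  clique.Nodup ∧ ∀ v ∈ clique, Reach clique E1 E2 start v

def Saturated (clique : List (Int × Int)) (E1 E2 : List (List Int))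
    (S : List (Int × Int)) : Prop :=
  ∀ v ∈ clique, v ∉ S → ∀ u ∈ S, caEdgeOK u v E1 E2 = false

theorem edge_swap (a b : Int) (E : List (List Int)) :
    pySetInEdges (PySem.Set.ofList [b, a]) E = pySetInEdges (PySem.Set.ofList [a, b]) E := by
  unfold pySetInEdges
  induction E with
  | nil => rfl
  | cons e t ih =>
    simp only [List.any_cons, ih]
    congr 1
    rw [Bool.eq_iff_iff, PySem.Set.equal_iff, PySem.Set.equal_iff]
    constructor <;> intro h x <;>
      simpa [PySem.Set.mem_ofList, or_comm] using h x

theorem aEdgeTest_eq (u v : Int × Int) (E1 E2 : List (List Int)) :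
    aEdgeTest u v E1 E2 = caEdgeOK u v E1 E2 := by
  unfold aEdgeTest caEdgeOK
  rw [edge_swap u.1 v.1, edge_swap u.2 v.2, Bool.or_self, Bool.or_self]

theorem nodup_length_le {S T : List (Int × Int)} (hS : S.Nodup)
    (hsub : ∀ x ∈ S, x ∈ T) : S.length ≤ T.toFinset.card := by
  rw [← List.toFinset_card_of_nodup hS]
  exact Finset.card_le_card (fun x hx =>
    List.mem_toFinset.mpr (hsub x (List.mem_toFinset.mp hx)))

-- a nodup subset of the same length as the clique forces Qprop
theorem full_of_len {clique : List (Int × Int)} {E1 E2 : List (List Int)}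
    {start : Int × Int} {S : List (Int × Int)} (hS : S.Nodup)
    (hsub : ∀ x ∈ S, x ∈ clique) (hR : ∀ x ∈ S, Reach clique E1 E2 start x)
    (hlen : S.length = clique.length) : Qprop clique E1 E2 start := by
  have hcard : clique.toFinset.card = clique.length :=
    le_antisymm (List.toFinset_card_le _) (hlen ▸ nodup_length_le hS hsub)
  have hnd : clique.Nodup := by
    rw [List.card_toFinset] at hcard
    exact List.dedup_eq_self.mp ((List.dedup_sublist clique).eq_of_length hcard)
  have heq : S.toFinset = clique.toFinset := by
    apply Finset.eq_of_subset_of_card_le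
    · exact fun x hx => List.mem_toFinset.mpr (hsub x (List.mem_toFinset.mp hx))
    · rw [List.toFinset_card_of_nodup hS, hcard, hlen]
  refine ⟨hnd, fun v hv => hR v ?_⟩
  have : v ∈ S.toFinset := heq ▸ List.mem_toFinset.mpr hv
  exact List.mem_toFinset.mp this

-- a saturated set containing the start has full length exactly under Qprop
theorem len_of_sat {clique : List (Int × Int)} {E1 E2 : List (List Int)}
    {start : Int × Int} {S : List (Int × Int)} (hS : S.Nodup)
    (hsub : ∀ x ∈ S, x ∈ clique) (hstart : start ∈ S)
    (hsat : Saturated clique E1 E2 S) (hQ : Qprop clique E1 E2 start) :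
    S.length = clique.length := by
  obtain ⟨hnd, hreach⟩ := hQ
  have hcs : ∀ v, Reach clique E1 E2 start v → v ∈ S := by
    intro v hv
    induction hv with
    | refl => exact hstart
    | tail _ hstep ih =>
      obtain ⟨hyc, hadj⟩ := hstep
      by_contra hvn
      have := hsat _ hyc hvn _ ih
      simp_all
  have h1 : S.length ≤ clique.toFinset.card := nodup_length_le hS hsub
  have h2 : clique.toFinset.card ≤ S.length := by
    rw [← List.toFinset_card_of_nodup hS]
    exact Finset.card_le_card (fun x hx =>
      List.mem_toFinset.mpr (hcs x (hreach x (List.mem_toFinset.mp hx))))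
  have h3 : clique.toFinset.card = clique.length := List.toFinset_card_of_nodup hnd
  omega

theorem set_len_eq (S : PySem.Set (Int × Int)) : PySem.Set.len S = (S.length : Int) := rfl

-- ===== A-side: is_connected computes Qprop =====
theorem isconn_iff (clique : List (Int × Int)) (E1 E2 : List (List Int))
    (start : Int × Int) (fuel : Nat) :
    ∀ (S : PySem.Set (Int × Int)) (vi : Int × Int), S.Nodup →
    (∀ x ∈ S, x ∈ clique) → vi ∈ clique → start ∈ PySem.Set.add S vi →
    (∀ x ∈ S, Reach clique E1 E2 start x) → Reach clique E1 E2 start vi →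
    clique.toFinset.card < fuel + (PySem.Set.add S vi).length →
    (is_connected fuel clique S vi E1 E2 = true ↔ Qprop clique E1 E2 start) := by
  induction fuel with
  | zero =>
    intro S vi hS hsub hvic _ hR hRvi hfuel
    have hnd : (PySem.Set.add S vi).Nodup := PySem.Set.nodup_add _ _ hS
    have hsub' : ∀ x ∈ PySem.Set.add S vi, x ∈ clique := by
      intro x hx
      rcases (PySem.Set.mem_add _ _ _).mp hx with h | h
      · exact hsub x h
      · exact h ▸ hvic
    have := nodup_length_le hnd hsub'
    omega
  | succ fuel ih =>
    intro S vi hS hsub hvic hstart hR hRvi hfuel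
    have hS' : (PySem.Set.add S vi).Nodup := PySem.Set.nodup_add _ _ hS
    have hsub' : ∀ x ∈ PySem.Set.add S vi, x ∈ clique := by
      intro x hx
      rcases (PySem.Set.mem_add _ _ _).mp hx with h | h
      · exact hsub x h
      · exact h ▸ hvic
    have hR' : ∀ x ∈ PySem.Set.add S vi, Reach clique E1 E2 start x := by
      intro x hx
      rcases (PySem.Set.mem_add _ _ _).mp hx with h | h
      · exact hR x h
      · exact h ▸ hRvi
    simp only [is_connected]
    by_cases hlen : PySem.Set.len (PySem.Set.add S vi) = (clique.length : Int)
    · rw [if_pos hlen]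
      simp only [true_iff]
      have hl : (PySem.Set.add S vi).length = clique.length := by
        rw [set_len_eq] at hlen; exact_mod_cast hlen
      exact full_of_len hS' hsub' hR' hl
    · rw [if_neg hlen]
      rcases hfind : clique.find? (fun v2 => !((PySem.Set.add S vi).contains v2) &&
          (PySem.Set.add S vi).any (fun vi' => aEdgeTest vi' v2 E1 E2)) with _ | v2
      · simp only [Bool.false_eq_true, false_iff]
        intro hQ
        apply hlen
        rw [set_len_eq]
        have hsat : Saturated clique E1 E2 (PySem.Set.add S vi) := by
          intro v hvc hvn u hu
          have hp := List.find?_eq_none.mp hfind v hvc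
          rw [← aEdgeTest_eq]
          have hcont : (PySem.Set.add S vi).contains v = false := by
            simpa [PySem.Set.contains_iff] using hvn
          simp only [hcont, Bool.not_false, Bool.true_and, Bool.not_eq_true,
            List.any_eq_false] at hp
          exact hp u hu
        have hstartm : start ∈ PySem.Set.add S vi := hstart
        exact_mod_cast len_of_sat hS' hsub' hstartm hsat hQ
      · have hv2c : v2 ∈ clique := List.mem_of_find?_eq_some hfind
        have hp := List.find?_some hfind
        simp only [Bool.and_eq_true, Bool.not_eq_eq_eq_not, Bool.not_true,
          List.any_eq_true] at hp
        obtain ⟨hnotin, u, hu, hadj⟩ := hp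
        have hv2n : v2 ∉ PySem.Set.add S vi := by
          simpa [PySem.Set.contains_iff] using hnotin
        have hRv2 : Reach clique E1 E2 start v2 :=
          (hR' u hu).tail ⟨hv2c, by rwa [aEdgeTest_eq] at hadj⟩
        have hlen2 : (PySem.Set.add (PySem.Set.add S vi) v2).length
            = (PySem.Set.add S vi).length + 1 := by
          rw [PySem.Set.add_of_not_mem hv2n, List.length_append, List.length_singleton]
        exact ih (PySem.Set.add S vi) v2 hS' hsub' hv2c
          ((PySem.Set.mem_add _ _ _).mpr (Or.inl hstart)) hR' hRv2 (by omega)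

-- ===== B-side: the sweep invariant and caLoop computes Qprop =====
theorem sweep_inv (clique : List (Int × Int)) (E1 E2 : List (List Int))
    (start : Int × Int) (l : List (Int × Int)) (hl : ∀ x ∈ l, x ∈ clique) :
    ∀ st : PySem.Set (Int × Int) × Bool, st.1.Nodup → (∀ x ∈ st.1, x ∈ clique) →
    (∀ x ∈ st.1, Reach clique E1 E2 start x) →
    (l.foldl (caStep E1 E2) st).1.Nodup ∧
    (∀ x ∈ st.1, x ∈ (l.foldl (caStep E1 E2) st).1) ∧
    (∀ x ∈ (l.foldl (caStep E1 E2) st).1, x ∈ clique) ∧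
    (∀ x ∈ (l.foldl (caStep E1 E2) st).1, Reach clique E1 E2 start x) ∧
    (st.2 = true → (l.foldl (caStep E1 E2) st).2 = true) ∧
    ((l.foldl (caStep E1 E2) st).2 = false →
      (l.foldl (caStep E1 E2) st).1 = st.1 ∧
      ∀ v ∈ l, v ∉ st.1 → ∀ u ∈ st.1, caEdgeOK u v E1 E2 = false) ∧
    (st.2 = false → (l.foldl (caStep E1 E2) st).2 = true →
      st.1.length < (l.foldl (caStep E1 E2) st).1.length) := by
  induction l with
  | nil =>
    intro st h1 h2 h3
    refine ⟨h1, fun x hx => hx, h2, h3, fun h => h, fun _ => ⟨rfl, by simp⟩, ?_⟩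
    intro h hh; simp_all
  | cons v rest ih =>
    intro st h1 h2 h3
    have hvc : v ∈ clique := hl v (List.mem_cons_self ..)
    have hlr : ∀ x ∈ rest, x ∈ clique := fun x hx => hl x (List.mem_cons_of_mem _ hx)
    simp only [List.foldl_cons]
    by_cases hc : (!(st.1.contains v) && st.1.any (fun u => caEdgeOK u v E1 E2)) = true
    · -- v is added: the flag is set
      have hstep : caStep E1 E2 st v = (st.1.add v, true) := by
        unfold caStep; rw [if_pos hc]
      simp only [Bool.and_eq_true, Bool.not_eq_eq_eq_not, Bool.not_true,
        List.any_eq_true] at hc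
      obtain ⟨hnotin, u, hu, hadj⟩ := hc
      have hvn : v ∉ st.1 := by simpa [PySem.Set.contains_iff] using hnotin
      have hRv : Reach clique E1 E2 start v := (h3 u hu).tail ⟨hvc, hadj⟩
      have h1' : (PySem.Set.add st.1 v).Nodup := PySem.Set.nodup_add _ _ h1
      have h2' : ∀ x ∈ PySem.Set.add st.1 v, x ∈ clique := by
        intro x hx
        rcases (PySem.Set.mem_add _ _ _).mp hx with h | h
        · exact h2 x h
        · exact h ▸ hvc
      have h3' : ∀ x ∈ PySem.Set.add st.1 v, Reach clique E1 E2 start x := by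
        intro x hx
        rcases (PySem.Set.mem_add _ _ _).mp hx with h | h
        · exact h3 x h
        · exact h ▸ hRv
      obtain ⟨c1, c2, c3, c4, c5, _c6, _c7⟩ := ih hlr (st.1.add v, true) h1' h2' h3'
      rw [hstep]
      have hflag := c5 rfl
      refine ⟨c1, ?_, c3, c4, fun _ => hflag, ?_, ?_⟩
      · exact fun x hx => c2 x ((PySem.Set.mem_add _ _ _).mpr (Or.inl hx))
      · intro hf; rw [hflag] at hf; cases hf
      · intro _ _
        have hlen : (PySem.Set.add st.1 v).length = st.1.length + 1 := by
          rw [PySem.Set.add_of_not_mem hvn, List.length_append, List.length_singleton]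
        have hle : (PySem.Set.add st.1 v).length
            ≤ ((rest.foldl (caStep E1 E2) (st.1.add v, true)).1).length := by
          have := nodup_length_le h1' (fun x hx =>
            (List.mem_toFinset.mp (List.mem_toFinset.mpr (c2 x hx))))
          -- subset into a nodup list: go through toFinset of the result
          calc (PySem.Set.add st.1 v).length
              ≤ ((rest.foldl (caStep E1 E2) (st.1.add v, true)).1).toFinset.card :=
                nodup_length_le h1' c2
            _ = ((rest.foldl (caStep E1 E2) (st.1.add v, true)).1).length :=
                List.toFinset_card_of_nodup c1
        omega
    · -- v is not added: the state is unchanged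
      have hstep : caStep E1 E2 st v = st := by
        simp only [caStep, if_neg hc]
      rw [hstep]
      obtain ⟨c1, c2, c3, c4, c5, c6, c7⟩ := ih hlr st h1 h2 h3
      refine ⟨c1, c2, c3, c4, c5, ?_, c7⟩
      intro hf
      obtain ⟨e1, e2⟩ := c6 hf
      refine ⟨e1, ?_⟩
      intro w hw hwn u hu
      rcases List.mem_cons.mp hw with h | h
      · subst h
        have hcont : st.1.contains w = false := by
          simpa [PySem.Set.contains_iff] using hwn
        simp only [hcont, Bool.not_false, Bool.true_and, Bool.not_eq_true,
          List.any_eq_false] at hc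
        exact hc u hu
      · exact e2 w h hwn u hu

theorem caLoop_iff (clique : List (Int × Int)) (E1 E2 : List (List Int))
    (start : Int × Int) (fuel : Nat) :
    ∀ S : PySem.Set (Int × Int), S.Nodup → (∀ x ∈ S, x ∈ clique) → start ∈ S →
    (∀ x ∈ S, Reach clique E1 E2 start x) →
    clique.toFinset.card < fuel + S.length →
    ((PySem.Set.len (caLoop fuel clique S E1 E2) = (clique.length : Int)) ↔
      Qprop clique E1 E2 start) := by
  induction fuel with
  | zero =>
    intro S hS hsub _ _ hfuel
    have := nodup_length_le hS hsub
    omega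
  | succ fuel ih =>
    intro S hS hsub hstart hR hfuel
    obtain ⟨c1, c2, c3, c4, _c5, c6, c7⟩ :=
      sweep_inv clique E1 E2 start clique (fun x hx => hx) (S, false) hS hsub hR
    simp only [caLoop]
    rcases hflag : (clique.foldl (caStep E1 E2) (S, false)).2 with _ | _
    · rw [if_neg (by simp [hflag])]
      obtain ⟨heq, hsat⟩ := c6 hflag
      rw [heq, set_len_eq]
      constructor
      · intro h
        exact full_of_len hS hsub hR (by exact_mod_cast h)
      · intro hQ
        exact_mod_cast len_of_sat hS hsub hstart (fun v hv => hsat v hv) hQ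
    · rw [if_pos (by simp [hflag])]
      have hlt := c7 rfl hflag
      have hsl : List.length ((S, false) : PySem.Set (Int × Int) × Bool).1 = S.length := rfl
      exact ih _ c1 c3 (c2 start hstart) c4 (by omega)

theorem per_clique (v : Int × Int) (vs : List (Int × Int)) (E1 E2 : List (List Int)) :
    (is_connected ((v :: vs).length + 1) (v :: vs) PySem.Set.empty v E1 E2 = true) ↔
    (PySem.Set.len (caLoop ((v :: vs).length + 1) (v :: vs) (PySem.Set.ofList [v]) E1 E2)
      = ((v :: vs).length : Int)) := by
  have hvc : v ∈ v :: vs := List.mem_cons_self ..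
  have hcard : (v :: vs).toFinset.card ≤ (v :: vs).length := List.toFinset_card_le _
  have hA := isconn_iff (v :: vs) E1 E2 v ((v :: vs).length + 1) PySem.Set.empty v
    List.nodup_nil (by simp [PySem.Set.empty]) hvc
    ((PySem.Set.mem_add _ _ _).mpr (Or.inr rfl)) (by simp [PySem.Set.empty])
    Relation.ReflTransGen.refl
    (by
      have : (PySem.Set.add PySem.Set.empty v).length = 1 := rfl
      omega)
  have hB := caLoop_iff (v :: vs) E1 E2 v ((v :: vs).length + 1) (PySem.Set.ofList [v])
    (PySem.Set.nodup_ofList _) (by simp [PySem.Set.mem_ofList])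
    (by simp [PySem.Set.mem_ofList])
    (by simp [PySem.Set.mem_ofList]; exact Relation.ReflTransGen.refl)
    (by
      have : (PySem.Set.ofList [v] : PySem.Set (Int × Int)).length = 1 := rfl
      omega)
  exact hA.trans hB.symm

theorem foldl_eq (cliques : List (List (Int × Int))) (E1 E2 : List (List Int))
    (acc : List (List (Int × Int))) :
    cliques.foldl (fun c_cliques clique =>
      match PySem.List.pyGet? clique 0 with
      | none => c_cliques
      | some vi =>
        let connected := is_connected (clique.length + 1) clique PySem.Set.empty vi E1 E2
        if connected then c_cliques ++ [clique] else c_cliques) acc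
    = cliques.foldl (fun c_cliques clique =>
      match PySem.List.pyGet? clique 0 with
      | none => c_cliques
      | some vi =>
        let seen := caLoop (clique.length + 1) clique (PySem.Set.ofList [vi]) E1 E2
        if PySem.Set.len seen = clique.length then c_cliques ++ [clique] else c_cliques) acc := by
  induction cliques generalizing acc with
  | nil => rfl
  | cons c rest ih =>
    cases c with
    | nil => simp only [List.foldl_cons]; exact ih acc
    | cons v vs =>
      simp only [List.foldl_cons, PySem.List.pyGet?_zero_cons]
      rw [if_congr (per_clique v vs E1 E2) rfl rfl]
      exact ih _

-- ===== VERDICT (by name: the statement is the Claim_ definition above) =====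
theorem check_adjacency_spec : Claim_equal_check_adjacency := by
  intro cliques E1 E2 _hdom _hpre
  unfold Spec_check_adjacency check_adjacency check_adjacency_alt
  exact foldl_eq cliques E1 E2 []
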